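-- pv_equiv track=rewrite | github.com/rootiq-ai/rootiq4 | fusion/fusion_layer.py | _get_max_severity
-- ===== SOURCE A (Python) =====
-- from typing import List, Dict, Any, Optional
--
-- def _get_max_severity(severities: Dict) -> str:
--     """
--     Get the maximum severity level
--     """
--     severity_order = {"critical": 5, "high": 4, "medium": 3, "low": 2, "info": 1}
--     max_severity = "info"
--     max_level = 0
--
--     for severity in severities:
--         level = severity_order.get(severity, 0)
--         if level > max_level:
--             max_level = level
--             max_severity = severity
--
--     return max_severity
-- ===== SOURCE B (Python) =====
-- def _get_max_severity(severities):
--     """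
--     Get the maximum severity level
--     """
--     for label in ("critical", "high", "medium", "low", "info"):
--         if label in severities:
--             return label
--     return "info"
-- ===== Notes on version B (the rewrite author's own statement) =====
-- stated objective: idiomatic
-- what changed: Replaces the data-driven max-tracking scan (carrying max_level/max_severity through the input) by a priority-driven membership test over the five labels from highest to lowest, returning the first one present, with 'info' as the natural default.
import Mathlib
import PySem

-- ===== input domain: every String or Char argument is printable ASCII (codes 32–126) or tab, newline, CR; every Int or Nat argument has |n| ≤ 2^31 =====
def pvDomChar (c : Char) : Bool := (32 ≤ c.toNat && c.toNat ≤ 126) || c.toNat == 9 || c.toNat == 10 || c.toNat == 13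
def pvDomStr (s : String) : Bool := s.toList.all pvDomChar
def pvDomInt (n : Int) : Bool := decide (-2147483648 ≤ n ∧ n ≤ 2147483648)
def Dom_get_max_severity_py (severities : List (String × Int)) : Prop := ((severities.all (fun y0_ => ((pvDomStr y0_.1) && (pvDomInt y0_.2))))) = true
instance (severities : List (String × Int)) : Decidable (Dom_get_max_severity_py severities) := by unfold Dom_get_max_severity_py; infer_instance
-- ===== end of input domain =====

-- B replaces A's max-tracking scan over the input by a priority-ordered membership test over
-- the five known labels, highest first (idiomatic; same asymptotic cost).

-- ===== PORT A =====
def pvSevOrder : PySem.Dict String Int :=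
  PySem.Dict.ofList [("critical", 5), ("high", 4), ("medium", 3), ("low", 2), ("info", 1)]

-- for severity in severities: level = severity_order.get(severity, 0); if level > max_level: update
def get_max_severity_py (severities : List (String × Int)) : String :=
  (severities.foldl
    (fun st p =>
      let level := pvSevOrder.getD p.1 0
      if level > st.2 then (p.1, level) else st)
    ("info", (0 : Int))).1

-- ===== PORT B =====
-- for label in ("critical","high","medium","low","info"): if label in severities: return label; return "info"
def get_max_severity_py_alt (severities : List (String × Int)) : String :=
  match ["critical", "high", "medium", "low", "info"].find?
      (fun lab => severities.any (fun p => p.1 == lab)) with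
  | some lab => lab
  | none => "info"

-- ===== PRECONDITION & SPEC =====
def Spec_get_max_severity_py (severities : List (String × Int)) (out : String) : Prop := out = get_max_severity_py_alt severities
instance (severities : List (String × Int)) (out : String) : Decidable (Spec_get_max_severity_py severities out) := by unfold Spec_get_max_severity_py; infer_instance

-- ===== CLAIM (what is proved, stated in full; the proofs are below) =====
def Claim_equal_get_max_severity_py : Prop := ∀ (severities : List (String × Int)), Dom_get_max_severity_py severities → Spec_get_max_severity_py severities (get_max_severity_py severities)

-- ===== LEMMAS AND PROOFS =====

-- the level A's lookup assigns to a key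
def pvOrd (s : String) : Int := pvSevOrder.getD s 0

-- the unique label carrying a given positive level
def pvLabelOf (n : Int) : String :=
  if n = 5 then "critical" else if n = 4 then "high" else if n = 3 then "medium"
  else if n = 2 then "low" else "info"

lemma pvOrd_eq (s : String) :
    pvOrd s = if s = "critical" then 5 else if s = "high" then 4 else if s = "medium" then 3
      else if s = "low" then 2 else if s = "info" then 1 else 0 := by
  by_cases h1 : s = "critical"
  · subst h1; decide
  by_cases h2 : s = "high"
  · subst h2; decide
  by_cases h3 : s = "medium"
  · subst h3; decide
  by_cases h4 : s = "low"
  · subst h4; decide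
  by_cases h5 : s = "info"
  · subst h5; decide
  have h : pvSevOrder = PySem.Dict.mk
      [("critical", 5), ("high", 4), ("medium", 3), ("low", 2), ("info", 1)] := by rfl
  simp only [pvOrd, h, PySem.Dict.getD_eq_get?_getD, PySem.Dict.get?_mk_cons, beq_iff_eq,
    if_neg h1, if_neg h2, if_neg h3, if_neg h4, if_neg h5]
  rw [if_neg (fun hx => h1 hx.symm), if_neg (fun hx => h2 hx.symm), if_neg (fun hx => h3 hx.symm),
    if_neg (fun hx => h4 hx.symm), if_neg (fun hx => h5 hx.symm)]
  simp [PySem.Dict.get?]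

lemma pvOrd_le (s : String) : pvOrd s ≤ 5 := by
  rw [pvOrd_eq]; split_ifs <;> omega

lemma pvLabelOf_ord (s : String) (h : 1 ≤ pvOrd s) : s = pvLabelOf (pvOrd s) := by
  rw [pvOrd_eq] at *
  by_cases h1 : s = "critical" <;> by_cases h2 : s = "high" <;> by_cases h3 : s = "medium" <;>
    by_cases h4 : s = "low" <;> by_cases h5 : s = "info" <;>
    simp_all [pvLabelOf]

-- A's loop invariant: the carried pair is (label of the max level so far, that max level)
lemma pvLoopA (ks : List String) : ∀ (ml : Int), 0 ≤ ml →
    ks.foldl (fun st k => if pvOrd k > st.2 then (k, pvOrd k) else st) (pvLabelOf ml, ml)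
      = (pvLabelOf (ks.foldl (fun a k => max a (pvOrd k)) ml),
         ks.foldl (fun a k => max a (pvOrd k)) ml) := by
  induction ks with
  | nil => intro ml _; simp
  | cons k ks ih =>
    intro ml hml
    simp only [List.foldl_cons]
    by_cases h : pvOrd k > ml
    · have h1 : (1:Int) ≤ pvOrd k := by omega
      have hmax : max ml (pvOrd k) = pvOrd k := by omega
      rw [if_pos h, hmax,
        show ((k, pvOrd k) : String × Int) = (pvLabelOf (pvOrd k), pvOrd k) by
          rw [← pvLabelOf_ord k h1]]
      exact ih (pvOrd k) (by omega)
    · have hmax : max ml (pvOrd k) = ml := by omega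
      rw [if_neg h, hmax]
      exact ih ml hml

lemma pvMax_ge (ks : List String) : ∀ ml : Int, ml ≤ ks.foldl (fun a k => max a (pvOrd k)) ml := by
  induction ks with
  | nil => intro ml; simp
  | cons k ks ih =>
    intro ml
    simp only [List.foldl_cons]
    exact le_trans (le_max_left _ _) (ih _)

lemma pvMax_mem_le (ks : List String) : ∀ (ml : Int) (k : String), k ∈ ks →
    pvOrd k ≤ ks.foldl (fun a k => max a (pvOrd k)) ml := by
  induction ks with
  | nil => intro _ _ h; simp at h
  | cons x ks ih =>
    intro ml k hk
    simp only [List.foldl_cons]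
    rcases List.mem_cons.mp hk with h | h
    · subst h; exact le_trans (le_max_right _ _) (pvMax_ge ks _)
    · exact ih _ k h

lemma pvMax_cases (ks : List String) : ∀ ml : Int,
    ks.foldl (fun a k => max a (pvOrd k)) ml = ml ∨
      ∃ k ∈ ks, ks.foldl (fun a k => max a (pvOrd k)) ml = pvOrd k := by
  induction ks with
  | nil => intro ml; left; rfl
  | cons x ks ih =>
    intro ml
    simp only [List.foldl_cons]
    rcases ih (max ml (pvOrd x)) with h | ⟨k, hk, h⟩
    · rcases max_choice ml (pvOrd x) with hm | hm
      · left; rw [h, hm]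
      · right; exact ⟨x, List.mem_cons_self, by rw [h, hm]⟩
    · right; exact ⟨k, List.mem_cons_of_mem _ hk, h⟩

lemma pvA_eq (severities : List (String × Int)) :
    get_max_severity_py severities
      = pvLabelOf ((severities.map Prod.fst).foldl (fun a k => max a (pvOrd k)) 0) := by
  have h := pvLoopA (severities.map Prod.fst) 0 le_rfl
  rw [List.foldl_map] at h
  simp only [get_max_severity_py, pvOrd] at h ⊢
  rw [show (("info", (0:Int))) = (pvLabelOf 0, (0:Int)) by decide, h]

lemma pvAnyKey (severities : List (String × Int)) (lab : String) :
    (severities.any fun p => p.1 == lab) = true ↔ lab ∈ severities.map Prod.fst := by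
  simp [List.any_eq_true, List.mem_map]

lemma pvB_eq (severities : List (String × Int)) :
    get_max_severity_py_alt severities =
      (if "critical" ∈ severities.map Prod.fst then "critical"
       else if "high" ∈ severities.map Prod.fst then "high"
       else if "medium" ∈ severities.map Prod.fst then "medium"
       else if "low" ∈ severities.map Prod.fst then "low" else "info") := by
  have e : ∀ lab : String, (severities.any fun p => p.1 == lab)
      = decide (lab ∈ severities.map Prod.fst) := by
    intro lab
    rcases h : severities.any fun p => p.1 == lab with _ | _
    · simp [← pvAnyKey, h]
    · simp [(pvAnyKey severities lab).mp h]
  simp only [get_max_severity_py_alt, List.find?, e]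
  by_cases h1 : "critical" ∈ severities.map Prod.fst <;>
    by_cases h2 : "high" ∈ severities.map Prod.fst <;>
    by_cases h3 : "medium" ∈ severities.map Prod.fst <;>
    by_cases h4 : "low" ∈ severities.map Prod.fst <;>
    by_cases h5 : "info" ∈ severities.map Prod.fst <;>
    simp [h1, h2, h3, h4, h5]

lemma pvOrd_lit : pvOrd "critical" = 5 ∧ pvOrd "high" = 4 ∧ pvOrd "medium" = 3 ∧ pvOrd "low" = 2 := by
  decide

-- ===== VERDICT (by name: the statement is the Claim_ definition above) =====
theorem get_max_severity_py_spec : Claim_equal_get_max_severity_py := by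
  intro severities _
  unfold Spec_get_max_severity_py
  rw [pvA_eq, pvB_eq]
  set ks := severities.map Prod.fst with hks
  set m := ks.foldl (fun a k => max a (pvOrd k)) 0 with hm
  have hge : ∀ k ∈ ks, pvOrd k ≤ m := fun k hk => pvMax_mem_le ks 0 k hk
  have h0 : (0:Int) ≤ m := pvMax_ge ks 0
  have hcases := pvMax_cases ks 0
  rw [← hm] at hcases
  have hub : m ≤ 5 := by
    rcases hcases with h | ⟨k, _, h⟩
    · omega
    · rw [h]; exact pvOrd_le k
  have hwit : 1 ≤ m → ∃ k ∈ ks, m = pvOrd k := by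
    intro h1
    rcases hcases with h | h
    · omega
    · exact h
  by_cases h1 : "critical" ∈ ks
  · have hc : (5:Int) ≤ m := by
      have := hge _ h1; rw [pvOrd_lit.1] at this; exact this
    have hm5 : m = 5 := by omega
    rw [hm5, if_pos h1]; decide
  · have hm5 : m ≠ 5 := by
      intro h5
      obtain ⟨k, hk, hke⟩ := hwit (by omega)
      have hl := pvLabelOf_ord k (by omega)
      have hord : pvOrd k = 5 := by omega
      rw [hord] at hl
      have hkc : k = "critical" := by rw [hl]; decide
      exact h1 (hkc ▸ hk)
    rw [if_neg h1]
    by_cases h2 : "high" ∈ ks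
    · have hc : (4:Int) ≤ m := by
        have := hge _ h2; rw [pvOrd_lit.2.1] at this; exact this
      have hm4 : m = 4 := by omega
      rw [hm4, if_pos h2]; decide
    · have hm4 : m ≠ 4 := by
        intro h4
        obtain ⟨k, hk, hke⟩ := hwit (by omega)
        have hl := pvLabelOf_ord k (by omega)
        have hord : pvOrd k = 4 := by omega
        rw [hord] at hl
        have hkc : k = "high" := by rw [hl]; decide
        exact h2 (hkc ▸ hk)
      rw [if_neg h2]
      by_cases h3 : "medium" ∈ ks
      · have hc : (3:Int) ≤ m := by
          have := hge _ h3; rw [pvOrd_lit.2.2.1] at this; exact this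
        have hm3 : m = 3 := by omega
        rw [hm3, if_pos h3]; decide
      · have hm3 : m ≠ 3 := by
          intro hx
          obtain ⟨k, hk, hke⟩ := hwit (by omega)
          have hl := pvLabelOf_ord k (by omega)
          have hord : pvOrd k = 3 := by omega
          rw [hord] at hl
          have hkc : k = "medium" := by rw [hl]; decide
          exact h3 (hkc ▸ hk)
        rw [if_neg h3]
        by_cases h4 : "low" ∈ ks
        · have hc : (2:Int) ≤ m := by
            have := hge _ h4; rw [pvOrd_lit.2.2.2] at this; exact this
          have hm2 : m = 2 := by omega
          rw [hm2, if_pos h4]; decide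
        · have hm2 : m ≠ 2 := by
            intro hx
            obtain ⟨k, hk, hke⟩ := hwit (by omega)
            have hl := pvLabelOf_ord k (by omega)
            have hord : pvOrd k = 2 := by omega
            rw [hord] at hl
            have hkc : k = "low" := by rw [hl]; decide
            exact h4 (hkc ▸ hk)
          rw [if_neg h4]
          have : m = 0 ∨ m = 1 := by omega
          rcases this with hx | hx <;> rw [hx] <;> decide
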